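-- pv_equiv track=rewrite | github.com/andrewschultz/miscellany | pyhead/i7.py | first_table_text
-- ===== SOURCE A (Python) =====
-- def first_table_text(my_line, include_quotes = False):
--     ary = my_line.strip().split("\t")
--     for x in ary:
--         if x.startswith('"'):
--             retval = x.split('"')[1]
--             if include_quotes:
--                 retval = '"' + retval + '"'
--             return retval
--     return ''
-- ===== SOURCE B (Python) =====
-- def first_table_text(my_line, include_quotes = False):
--     # single left-to-right character scan instead of split("\t") + per-field split('"')
--     s = my_line.strip()
--     at_field_start = True
--     for i, c in enumerate(s):
--         if at_field_start and c == '"':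
--             j = i + 1
--             while j < len(s) and s[j] != '"' and s[j] != '\t':
--                 j += 1
--             retval = s[i + 1:j]
--             return '"' + retval + '"' if include_quotes else retval
--         at_field_start = (c == '\t')
--     return ''
-- ===== Notes on version B (the rewrite author's own statement) =====
-- stated objective: alternative
-- what changed: Replaced the tab-split into a field list plus a per-field startswith/quote-split pass with a single left-to-right character scan that tracks field starts and takes the quoted text directly, building no intermediate lists.
import Mathlib
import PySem

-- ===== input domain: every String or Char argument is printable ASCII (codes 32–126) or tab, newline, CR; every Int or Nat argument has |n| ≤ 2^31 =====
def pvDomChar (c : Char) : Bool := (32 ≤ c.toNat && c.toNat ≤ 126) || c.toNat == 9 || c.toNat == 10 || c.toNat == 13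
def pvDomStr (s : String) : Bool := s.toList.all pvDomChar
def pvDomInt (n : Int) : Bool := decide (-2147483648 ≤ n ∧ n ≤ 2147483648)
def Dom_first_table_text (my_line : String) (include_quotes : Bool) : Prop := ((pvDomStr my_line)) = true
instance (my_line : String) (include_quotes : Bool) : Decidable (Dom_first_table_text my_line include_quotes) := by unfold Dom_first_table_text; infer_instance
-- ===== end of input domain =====

-- B replaces A's split("\t") + per-field startswith + split('"') with a single left-to-right
-- character scan tracking field starts (objective: alternative, same cost, one pass, no lists built).

-- ===== PORT A =====
-- the for-loop over ary; fields kept as List Char (PySem.Str wrappers are thin over Chars)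
def fttAGo (ary : List (List Char)) (include_quotes : Bool) : String :=
  match ary with
  | [] => ""                                   -- return ''
  | x :: rest =>
    if PySem.Chars.startswith x ['"'] then
      -- x.split('"')[1]; the field starts with '"', so the split always has ≥ 2 parts
      -- and Python never raises here: the .getD [] default is unreachable
      let retval := (PySem.List.pyGet? (PySem.Chars.splitOn x ['"']) 1).getD []
      if include_quotes then String.mk ('"' :: retval ++ ['"']) else String.mk retval
    else fttAGo rest include_quotes

def first_table_text (my_line : String) (include_quotes : Bool) : String :=
  fttAGo (PySem.Chars.splitOn (PySem.Str.strip my_line).toList ['\t']) include_quotes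

-- ===== PORT B =====
-- the inner while loop + slice s[i+1:j]: chars until the next '"' or '\t'
def fttField : List Char → List Char
  | [] => []
  | c :: r => if c = '"' || c = '\t' then [] else c :: fttField r

-- the for-loop over the stripped string, carrying at_field_start
def fttScan (cs : List Char) (atFieldStart : Bool) (include_quotes : Bool) : String :=
  match cs with
  | [] => ""                                   -- return ''
  | c :: r =>
    if atFieldStart && c == '"' then
      let retval := fttField r
      if include_quotes then String.mk ('"' :: retval ++ ['"']) else String.mk retval
    else fttScan r (c == '\t') include_quotes

def first_table_text_alt (my_line : String) (include_quotes : Bool) : String :=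
  fttScan (PySem.Str.strip my_line).toList true include_quotes

-- ===== PRECONDITION & SPEC =====
def Spec_first_table_text (my_line : String) (include_quotes : Bool) (out : String) : Prop := out = first_table_text_alt my_line include_quotes
instance (my_line : String) (include_quotes : Bool) (out : String) : Decidable (Spec_first_table_text my_line include_quotes out) := by unfold Spec_first_table_text; infer_instance

-- ===== CLAIM (what is proved, stated in full; the proofs are below) =====
def Claim_equal_first_table_text : Prop := ∀ (my_line : String) (include_quotes : Bool), Dom_first_table_text my_line include_quotes → Spec_first_table_text my_line include_quotes (first_table_text my_line include_quotes)

-- ===== LEMMAS AND PROOFS =====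

-- splitting on a one-character separator, written as plain structural recursion
def splitC (sep : Char) : List Char → List (List Char)
  | [] => [[]]
  | c :: r => if c = sep then [] :: splitC sep r else (splitC sep r).modifyHead (c :: ·)

theorem splitC_ne_nil (sep : Char) (l : List Char) : splitC sep l ≠ [] := by
  cases l with
  | nil => simp [splitC]
  | cons c r =>
    simp only [splitC]
    split
    · simp
    · cases h : splitC sep r with
      | nil => exact absurd h (splitC_ne_nil sep r)
      | cons a t => simp

theorem go_char (sep : Char) : ∀ (fuel : Nat) (l cur : List Char) (acc : List (List Char)),
    l.length < fuel →
    PySem.Chars.splitOn.go [sep] fuel l cur acc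
      = acc.reverse ++ (splitC sep l).modifyHead (cur.reverse ++ ·) := by
  intro fuel
  induction fuel with
  | zero => intro l cur acc h; omega
  | succ n ih =>
    intro l cur acc h
    cases l with
    | nil =>
      simp [PySem.Chars.splitOn.go, splitC]
    | cons c r =>
      by_cases hc : c = sep
      · subst hc
        rw [show PySem.Chars.splitOn.go [c] (n+1) (c :: r) cur acc
              = PySem.Chars.splitOn.go [c] n r [] (cur.reverse :: acc) from by
            simp [PySem.Chars.splitOn.go, List.isPrefixOf]]
        rw [ih r [] (cur.reverse :: acc) (by simpa using Nat.lt_of_succ_lt_succ (by simpa using h))]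
        cases hs : splitC c r with
        | nil => exact absurd hs (splitC_ne_nil c r)
        | cons a t => simp [splitC, hs]
      · rw [show PySem.Chars.splitOn.go [sep] (n+1) (c :: r) cur acc
              = PySem.Chars.splitOn.go [sep] n r (c :: cur) acc from by
            simp only [PySem.Chars.splitOn.go, List.isPrefixOf]
            rw [if_neg]
            simp only [Bool.and_true, beq_iff_eq]
            exact fun h' => absurd h'.symm hc]
        rw [ih r (c :: cur) acc (by simpa using Nat.lt_of_succ_lt_succ (by simpa using h))]
        cases hs : splitC sep r with
        | nil => exact absurd hs (splitC_ne_nil sep r)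
        | cons a t => simp [splitC, hs, hc]

theorem splitOn_char (sep : Char) (l : List Char) :
    PySem.Chars.splitOn l [sep] = splitC sep l := by
  rw [PySem.Chars.splitOn, go_char sep (l.length+1) l [] [] (by omega)]
  cases hs : splitC sep l with
  | nil => exact absurd hs (splitC_ne_nil sep l)
  | cons a t => simp

-- B's inner field take equals: first '"'-delimited piece of the first tab field of r
theorem fttField_eq (r : List Char) :
    fttField r = (splitC '"' ((splitC '\t' r).headI)).headI := by
  induction r with
  | nil => simp [fttField, splitC]
  | cons c r ih =>
    by_cases hq : c = '"'
    · subst hq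
      cases hs : splitC '\t' r with
      | nil => exact absurd hs (splitC_ne_nil _ r)
      | cons h t => simp [fttField, splitC, hs]
    · by_cases ht : c = '\t'
      · subst ht
        simp [fttField, splitC]
      · cases hs : splitC '\t' r with
        | nil => exact absurd hs (splitC_ne_nil _ r)
        | cons h t =>
          cases hq2 : splitC '"' h with
          | nil => exact absurd hq2 (splitC_ne_nil _ h)
          | cons a t' =>
            simp [fttField, splitC, hs, hq, ht, hq2, ih]

-- the A-side value of the quoted field '"' :: h
theorem fttAGo_quoted (h : List Char) (t : List (List Char)) (iq : Bool) :
    fttAGo (('"' :: h) :: t) iq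
      = (if iq then String.mk ('"' :: (splitC '"' h).headI ++ ['"'])
         else String.mk ((splitC '"' h).headI)) := by
  cases hq : splitC '"' h with
  | nil => exact absurd hq (splitC_ne_nil _ h)
  | cons a t' =>
    simp [fttAGo, PySem.Chars.startswith, List.isPrefixOf, splitOn_char, splitC, hq,
      PySem.List.pyGet?, PySem.List.pyIdx?]

-- main invariant: the char scan equals A's loop over the tab fields
theorem scan_eq (iq : Bool) : ∀ cs : List Char,
    fttScan cs true iq = fttAGo (splitC '\t' cs) iq ∧
    fttScan cs false iq = fttAGo (splitC '\t' cs).tail iq := by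
  intro cs
  induction cs with
  | nil => simp [fttScan, fttAGo, splitC, PySem.Chars.startswith, List.isPrefixOf]
  | cons c r ih =>
    cases hs : splitC '\t' r with
    | nil => exact absurd hs (splitC_ne_nil _ r)
    | cons h t =>
      constructor
      · -- at a field start
        by_cases hq : c = '"'
        · subst hq
          rw [show fttScan ('"' :: r) true iq
                = (if iq then String.mk ('"' :: fttField r ++ ['"']) else String.mk (fttField r)) from by
              simp [fttScan]]
          have hnt : ('"' : Char) ≠ '\t' := by decide
          simp only [splitC, if_neg hnt, hs, List.modifyHead, fttAGo_quoted]
          rw [fttField_eq, hs]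
          simp
        · by_cases ht : c = '\t'
          · subst ht
            have : fttScan ('\t' :: r) true iq = fttScan r true iq := by
              simp [fttScan]
            rw [this, (ih).1]
            simp [splitC, fttAGo, PySem.Chars.startswith, List.isPrefixOf]
          · have hb : (c == '\t') = false := by simp [ht]
            have : fttScan (c :: r) true iq = fttScan r false iq := by
              simp [fttScan, hb]
              exact fun e => absurd e hq
            rw [this, (ih).2, hs]
            simp [splitC, ht, hs, fttAGo, PySem.Chars.startswith, List.isPrefixOf, Ne.symm hq]
      · -- not at a field start
        by_cases ht : c = '\t'
        · subst ht
          have : fttScan ('\t' :: r) false iq = fttScan r true iq := by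
            simp [fttScan]
          rw [this, (ih).1]
          simp [splitC]
        · have hb : (c == '\t') = false := by simp [ht]
          have : fttScan (c :: r) false iq = fttScan r false iq := by
            simp [fttScan, hb]
          rw [this, (ih).2, hs]
          simp [splitC, ht, hs]

-- ===== VERDICT (by name: the statement is the Claim_ definition above) =====
theorem first_table_text_spec : Claim_equal_first_table_text := by
  intro my_line iq _
  unfold Spec_first_table_text first_table_text first_table_text_alt
  rw [splitOn_char, (scan_eq iq (PySem.Str.strip my_line).toList).1]
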